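-- pv_equiv track=rewrite | github.com/mysbupt/FashionKE | utility.py | get_clean_noise_ids
-- ===== SOURCE A (Python) =====
-- def get_clean_noise_ids(train_ids, all_clean_ids):
--     train_ids_clean = set()
--     train_ids_noise = set()
--     for id_ in train_ids:
--         if id_ in all_clean_ids:
--             train_ids_clean.add(id_)
--         else:
--             train_ids_noise.add(id_)
--
--     return sorted(list(train_ids_clean)), train_ids_noise
-- ===== SOURCE B (Python) =====
-- def get_clean_noise_ids(train_ids, all_clean_ids):
--     # sort-then-scan: build the sorted clean list directly, deduplicating by
--     # skipping adjacent equal ids; the noise set is an independent set difference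
--     clean = []
--     prev = None
--     for x in sorted(train_ids):
--         if x != prev and x in all_clean_ids:
--             clean.append(x)
--         prev = x
--     return clean, set(train_ids).difference(all_clean_ids)
-- ===== Notes on version B (the rewrite author's own statement) =====
-- stated objective: alternative
-- what changed: Replaces A's hash-partitioning pass followed by a final sort with a sort-then-scan: sort train_ids first, build the sorted clean list directly while deduplicating by skipping adjacent equal ids, and compute the noise set independently as set(train_ids).difference(all_clean_ids).
import Mathlib
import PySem

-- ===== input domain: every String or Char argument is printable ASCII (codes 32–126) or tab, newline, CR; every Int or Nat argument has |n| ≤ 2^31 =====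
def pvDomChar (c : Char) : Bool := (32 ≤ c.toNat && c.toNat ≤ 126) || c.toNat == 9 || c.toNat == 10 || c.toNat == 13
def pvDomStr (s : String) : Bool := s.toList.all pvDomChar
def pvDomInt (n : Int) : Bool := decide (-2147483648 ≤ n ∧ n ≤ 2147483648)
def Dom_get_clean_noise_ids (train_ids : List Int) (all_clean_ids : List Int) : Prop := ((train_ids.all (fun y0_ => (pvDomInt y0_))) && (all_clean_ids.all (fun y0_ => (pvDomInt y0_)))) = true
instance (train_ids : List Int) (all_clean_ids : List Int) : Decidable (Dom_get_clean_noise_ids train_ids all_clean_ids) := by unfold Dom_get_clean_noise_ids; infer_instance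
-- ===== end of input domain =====

-- B replaces A's hash-partitioning pass plus final sort by a sort-then-scan that emits the
-- sorted clean list directly (dedup by skipping adjacent equal ids) and an independent set
-- difference for the noise set; same result, a different algorithm of similar cost.

-- ===== PORT A =====
def get_clean_noise_ids (train_ids : List Int) (all_clean_ids : List Int) : List Int × List Int :=
  let p := train_ids.foldl
    (fun (p : PySem.Set Int × PySem.Set Int) id_ =>
      if id_ ∈ all_clean_ids then (PySem.Set.add p.1 id_, p.2) else (p.1, PySem.Set.add p.2 id_))
    (PySem.Set.empty, PySem.Set.empty)
  (PySem.List.sorted p.1 (fun x => x) false, p.2)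

-- ===== PORT B =====
def get_clean_noise_ids_alt (train_ids : List Int) (all_clean_ids : List Int) : List Int × List Int :=
  -- for-loop over sorted(train_ids) with state (prev, clean); x != None is always true, so
  -- prev : Option Int and the test is st.1 ≠ some x
  let p := (PySem.List.sorted train_ids (fun x => x) false).foldl
    (fun (st : Option Int × List Int) x =>
      if st.1 ≠ some x ∧ x ∈ all_clean_ids then (some x, st.2 ++ [x]) else (some x, st.2))
    (none, [])
  -- set(train_ids).difference(all_clean_ids): Set.diff's second argument may be any iterable
  (p.2, PySem.Set.diff (PySem.Set.ofList train_ids) all_clean_ids)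

-- ===== PRECONDITION & SPEC =====
def Spec_get_clean_noise_ids (train_ids : List Int) (all_clean_ids : List Int) (out : List Int × List Int) : Prop := out = get_clean_noise_ids_alt train_ids all_clean_ids
instance (train_ids : List Int) (all_clean_ids : List Int) (out : List Int × List Int) : Decidable (Spec_get_clean_noise_ids train_ids all_clean_ids out) := by unfold Spec_get_clean_noise_ids; infer_instance

-- ===== CLAIM (what is proved, stated in full; the proofs are below) =====
def Claim_equal_get_clean_noise_ids : Prop := ∀ (train_ids : List Int) (all_clean_ids : List Int), Dom_get_clean_noise_ids train_ids all_clean_ids → Spec_get_clean_noise_ids train_ids all_clean_ids (get_clean_noise_ids train_ids all_clean_ids)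

-- ===== LEMMAS AND PROOFS =====

-- recursive view of B's scan loop (clean-list component only)
def pvScan (q : Int → Bool) : Option Int → List Int → List Int
  | _, [] => []
  | p, x :: xs => if p ≠ some x ∧ q x = true then x :: pvScan q (some x) xs else pvScan q (some x) xs

theorem foldl_scan (q : Int → Bool) :
    ∀ (s : List Int) (p : Option Int) (acc : List Int),
      (s.foldl
        (fun (st : Option Int × List Int) x =>
          if st.1 ≠ some x ∧ q x = true then (some x, st.2 ++ [x]) else (some x, st.2))
        (p, acc)).2 = acc ++ pvScan q p s := by
  intro s
  induction s with
  | nil => intro p acc; simp [pvScan]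
  | cons x t ih =>
    intro p acc
    by_cases h : p ≠ some x ∧ q x = true <;> simp [pvScan, h, ih, List.append_assoc]

theorem scan_mem (q : Int → Bool) :
    ∀ (s : List Int), s.Pairwise (fun a b => a ≤ b) →
      ∀ (p : Option Int), (∀ v, p = some v → ∀ y ∈ s, v ≤ y) →
        ∀ x, x ∈ pvScan q p s ↔ (x ∈ s ∧ q x = true ∧ p ≠ some x) := by
  intro s
  induction s with
  | nil => intro _ p _ x; simp [pvScan]
  | cons a t ih =>
    intro hs p hp x
    have hat : ∀ y ∈ t, a ≤ y := fun y hy => (List.pairwise_cons.mp hs).1 y hy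
    have ht := (List.pairwise_cons.mp hs).2
    have ihx := ih ht (some a) (by intro v hv y hy; injection hv with hv; exact hv ▸ hat y hy)
    -- p = some v inside t: v ≤ a and a ≤ x forces x = a when p = some x and x ∈ t
    have hpt : ∀ x, x ∈ t → x ≠ a → p ≠ some x := by
      intro x hxt hxa hpx
      have hva := hp x hpx a (by simp)
      have hax := hat x hxt
      exact hxa (le_antisymm hva hax)
    by_cases h : p ≠ some a ∧ q a = true
    · simp only [pvScan, if_pos h, List.mem_cons]
      constructor
      · rintro (rfl | hx)
        · exact ⟨Or.inl rfl, h.2, h.1⟩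
        · have := (ihx x).mp hx
          refine ⟨Or.inr this.1, this.2.1, hpt x this.1 ?_⟩
          intro he; exact this.2.2 (by rw [he])
      · rintro ⟨(rfl | hxt), hq, hpx⟩
        · exact Or.inl rfl
        · by_cases hxa : x = a
          · exact Or.inl hxa
          · exact Or.inr ((ihx x).mpr ⟨hxt, hq, by simp [Ne.symm hxa]⟩)
    · simp only [pvScan, if_neg h]
      rw [ihx x]
      constructor
      · rintro ⟨hxt, hq, hxa⟩
        have hxa' : x ≠ a := by intro he; exact hxa (by rw [he])
        exact ⟨List.mem_cons_of_mem a hxt, hq, hpt x hxt hxa'⟩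
      · rintro ⟨hx, hq, hpx⟩
        rcases List.mem_cons.mp hx with rfl | hxt
        · exfalso
          rcases not_and_or.mp h with h1 | h2
          · exact hpx (not_not.mp h1)
          · exact h2 hq
        · by_cases hxa : x = a
          · exfalso
            subst hxa
            rcases not_and_or.mp h with h1 | h2
            · exact hpx (not_not.mp h1)
            · exact h2 hq
          · exact ⟨hxt, hq, by simp [Ne.symm hxa]⟩

theorem scan_pairwise (q : Int → Bool) :
    ∀ (s : List Int), s.Pairwise (fun a b => a ≤ b) →
      ∀ (p : Option Int), (pvScan q p s).Pairwise (· < ·) := by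
  intro s
  induction s with
  | nil => intro _ p; simp [pvScan]
  | cons a t ih =>
    intro hs p
    have hat : ∀ y ∈ t, a ≤ y := fun y hy => (List.pairwise_cons.mp hs).1 y hy
    have ht := (List.pairwise_cons.mp hs).2
    by_cases h : p ≠ some a ∧ q a = true
    · simp only [pvScan, if_pos h]
      refine List.pairwise_cons.mpr ⟨?_, ih ht (some a)⟩
      intro y hy
      have hm := (scan_mem q t ht (some a) (by intro v hv z hz; injection hv with hv; exact hv ▸ hat z hz) y).mp hy
      have hya : y ≠ a := by intro he; exact hm.2.2 (by rw [he])
      exact lt_of_le_of_ne (hat y hm.1) (Ne.symm hya)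
    · simp only [pvScan, if_neg h]
      exact ih ht (some a)

-- filtering commutes with Set.add
theorem filter_set_add (q : Int → Bool) (s : List Int) (x : Int) :
    (PySem.Set.add s x).filter q = if q x then PySem.Set.add (s.filter q) x else s.filter q := by
  simp only [PySem.Set.add, List.contains_iff_mem]
  by_cases hx : x ∈ s
  · by_cases hq : q x = true <;>
      simp [hx, hq, List.contains_iff_mem, List.mem_filter]
  · by_cases hq : q x = true <;>
      simp [hx, hq, List.filter_append, List.contains_iff_mem, List.mem_filter]

-- filtering commutes with a fold of Set.add
theorem filter_foldl_add (q : Int → Bool) :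
    ∀ (xs s : List Int),
      (xs.foldl PySem.Set.add s).filter q = (xs.filter q).foldl PySem.Set.add (s.filter q) := by
  intro xs
  induction xs with
  | nil => intro s; rfl
  | cons x xs ih =>
    intro s
    by_cases hq : q x = true <;>
      simp [List.foldl_cons, ih, filter_set_add, hq]

-- A's loop splits into the two filtered add-folds
theorem loopA (acl : List Int) :
    ∀ (l : List Int) (c n : PySem.Set Int),
      l.foldl
        (fun (p : PySem.Set Int × PySem.Set Int) id_ =>
          if id_ ∈ acl then (PySem.Set.add p.1 id_, p.2) else (p.1, PySem.Set.add p.2 id_))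
        (c, n)
      = ((l.filter (fun x => decide (x ∈ acl))).foldl PySem.Set.add c,
         (l.filter (fun x => !decide (x ∈ acl))).foldl PySem.Set.add n) := by
  intro l
  induction l with
  | nil => intro c n; rfl
  | cons x l ih =>
    intro c n
    by_cases hx : x ∈ acl <;> simp [List.foldl_cons, hx, ih]

theorem get_clean_noise_ids_spec : Claim_equal_get_clean_noise_ids := by
  intro train_ids all_clean_ids _
  show get_clean_noise_ids train_ids all_clean_ids = get_clean_noise_ids_alt train_ids all_clean_ids
  unfold get_clean_noise_ids get_clean_noise_ids_alt
  rw [loopA]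
  set q : Int → Bool := fun x => decide (x ∈ all_clean_ids) with hqdef
  -- clean side
  set s := PySem.List.sorted train_ids (fun x => x) false with hsdef
  have hsp : s.Pairwise (fun a b => a ≤ b) := by
    simpa using PySem.List.sorted_pairwise train_ids (fun x => x)
  have hfold :
      (s.foldl
        (fun (st : Option Int × List Int) x =>
          if st.1 ≠ some x ∧ x ∈ all_clean_ids then (some x, st.2 ++ [x]) else (some x, st.2))
        (none, [])).2 = pvScan q none s := by
    have := foldl_scan q s none []
    simpa [hqdef] using this
  have hC :
      (train_ids.filter q).foldl PySem.Set.add PySem.Set.empty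
        = (PySem.Set.ofList train_ids).filter q := by
    simpa using (filter_foldl_add q train_ids []).symm
  have hCnd : ((PySem.Set.ofList train_ids).filter q).Nodup :=
    (PySem.Set.nodup_ofList train_ids).filter q
  have hRpw : (pvScan q none s).Pairwise (· < ·) := scan_pairwise q s hsp none
  have hRnd : (pvScan q none s).Nodup := hRpw.nodup
  have hmem : ∀ x, x ∈ pvScan q none s ↔ x ∈ (PySem.Set.ofList train_ids).filter q := by
    intro x
    rw [scan_mem q s hsp none (by intro v hv; cases hv) x]
    simp [hsdef, PySem.List.mem_sorted, List.mem_filter, PySem.Set.mem_ofList, hqdef]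
  have hperm : (pvScan q none s).Perm ((train_ids.filter q).foldl PySem.Set.add PySem.Set.empty) := by
    rw [hC]
    exact (List.perm_ext_iff_of_nodup hRnd hCnd).mpr hmem
  have hclean :
      PySem.List.sorted ((train_ids.filter q).foldl PySem.Set.add PySem.Set.empty) (fun x => x) false
        = pvScan q none s :=
    PySem.List.sorted_eq_of_perm_of_pairwise_lt _ _ _ hperm hRpw
  -- noise side
  have hnoise :
      (train_ids.filter (fun x => !decide (x ∈ all_clean_ids))).foldl PySem.Set.add PySem.Set.empty
        = PySem.Set.diff (PySem.Set.ofList train_ids) all_clean_ids := by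
    have := (filter_foldl_add (fun x => !decide (x ∈ all_clean_ids)) train_ids []).symm
    simpa [PySem.Set.diff, List.contains_iff_mem] using this
  simp only [hqdef] at hclean
  simp only [hfold, hclean, hnoise, hqdef]

-- ===== VERDICT (by name: the statement is the Claim_ definition above) =====
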